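-- pv_equiv track=rewrite | github.com/PengJiaXi517/tagger | raw_data_preprocess/map_state_packer.py | remove_duplicated_lane_seqs
-- ===== SOURCE A (Python) =====
-- import functools
--
-- def remove_duplicated_lane_seqs(exists_lane_seqs):
--     candidate_lane_seq_idx = [
--         (idx, lane_seq) for idx, lane_seq in enumerate(exists_lane_seqs)
--     ]
--
--     def cmp_lane_seq(seq_a, seq_b):
--         if len(seq_a[1]) == len(seq_b[1]):
--             if seq_a[0] < seq_b[0]:
--                 return -1
--             else:
--                 return 1
--         if len(seq_a[1]) > len(seq_b[1]):
--             return -1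
--         else:
--             return 1
--
--     def is_lane_seq_belong_to_another(target_lane_seq, source_lane_seq):
--         if len(target_lane_seq) < len(source_lane_seq):
--             return False
--         is_belong = False
--         for i in range(len(target_lane_seq) - len(source_lane_seq) + 1):
--             is_belong = True
--             for j in range(len(source_lane_seq)):
--                 if target_lane_seq[i + j] != source_lane_seq[j]:
--                     is_belong = False
--                     break
--             if is_belong:
--                 return True
--
--         return False
--
--     candidate_lane_seq_idx = sorted(
--         candidate_lane_seq_idx, key=functools.cmp_to_key(cmp_lane_seq)
--     )
--
--     filter_index = []
--     for i, source_lane_seq in candidate_lane_seq_idx: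
--         is_keep = True
--         for j in filter_index:
--             target_lane_seq = exists_lane_seqs[j]
--             if is_lane_seq_belong_to_another(target_lane_seq, source_lane_seq):
--                 is_keep = False
--                 break
--         if is_keep:
--             filter_index.append(i)
--
--     filter_index = sorted(filter_index)
--
--     return filter_index
-- ===== SOURCE B (Python) =====
-- def remove_duplicated_lane_seqs(exists_lane_seqs):
--     def contains(t, s):
--         if len(s) <= len(t):
--             return any(t[k:k + len(s)] == s for k in range(len(t) - len(s) + 1))
--         return False
--
--     def dominates(t, s, j, i):
--         return (len(t) > len(s) or (len(t) == len(s) and j < i)) and contains(t, s)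
--
--     n = len(exists_lane_seqs)
--     res = []
--     for i in range(n):
--         s = exists_lane_seqs[i]
--         if not any(dominates(exists_lane_seqs[j], s, j, i) for j in range(n)):
--             res.append(i)
--     return res
-- ===== Notes on version B (the rewrite author's own statement) =====
-- stated objective: simpler
-- what changed: B drops A's comparator sort and incrementally grown kept-list: because substring-domination by a (longer, or equal-length earlier) sequence is transitive, an index is kept iff no such sequence anywhere in the list contains it, so B does one independent per-index check over the whole list and emits indices already in ascending order.
import Mathlib
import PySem

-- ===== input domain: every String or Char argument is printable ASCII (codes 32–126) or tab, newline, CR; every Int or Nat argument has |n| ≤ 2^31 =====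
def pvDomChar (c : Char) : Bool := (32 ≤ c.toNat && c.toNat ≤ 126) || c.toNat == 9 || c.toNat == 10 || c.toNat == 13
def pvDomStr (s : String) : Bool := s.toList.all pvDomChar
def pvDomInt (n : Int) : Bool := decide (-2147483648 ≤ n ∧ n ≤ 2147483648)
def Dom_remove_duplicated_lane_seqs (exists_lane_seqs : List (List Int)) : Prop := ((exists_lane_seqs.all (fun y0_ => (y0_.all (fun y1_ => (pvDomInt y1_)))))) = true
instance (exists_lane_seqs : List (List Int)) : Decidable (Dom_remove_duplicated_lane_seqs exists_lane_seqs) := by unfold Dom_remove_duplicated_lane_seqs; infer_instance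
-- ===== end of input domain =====

-- B replaces A's comparator sort + incrementally grown kept-list by one independent
-- per-index domination check (valid since substring-domination is transitive); objective: simpler.
-- ===== PORT A =====
-- is_lane_seq_belong_to_another: the two break-out loops become any/all over the same ranges;
-- all indices i+j, j hit by the Python are in range, so pyGetD's default is never used.
def pvBelong (target source : List Int) : Bool :=
  if (target.length : Int) < (source.length : Int) then false
  else
    (PySem.List.pyRange 0 ((target.length : Int) - (source.length : Int) + 1) 1).any (fun i =>
      (PySem.List.pyRange 0 (source.length : Int) 1).all (fun j =>
        PySem.List.pyGetD target (i + j) 0 == PySem.List.pyGetD source j 0))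

-- sorted(..., key=functools.cmp_to_key(cmp_lane_seq)): the comparator is exactly the strict order
-- (length desc, index asc); indices are pairwise distinct, so the stable two-key sort with keys
-- (-len, idx) produces the identical ordering.  exists_lane_seqs[j] is always in range (indices
-- come from enumerate), so pyGetD's default is never used.
def remove_duplicated_lane_seqs (exists_lane_seqs : List (List Int)) : List Int :=
  let candidate := PySem.List.enumerate exists_lane_seqs 0
  let candidate :=
    PySem.List.sorted2 candidate (fun p => -(p.2.length : Int)) (fun p => p.1) false
  let filter_index := candidate.foldl (fun acc p =>
    if acc.all (fun j => !pvBelong (PySem.List.pyGetD exists_lane_seqs j []) p.2) then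
      acc ++ [p.1]
    else acc) []
  PySem.List.sorted filter_index (fun x => x) false

-- ===== PORT B =====
def pvContains (t s : List Int) : Bool :=
  if (s.length : Int) ≤ (t.length : Int) then
    (PySem.List.pyRange 0 ((t.length : Int) - (s.length : Int) + 1) 1).any (fun k =>
      PySem.List.slice t (some k) (some (k + (s.length : Int))) == s)
  else false

def pvBeats (t s : List Int) (j i : Int) : Bool :=
  (decide ((t.length : Int) > (s.length : Int)) ||
    (decide ((t.length : Int) = (s.length : Int)) && decide (j < i))) && pvContains t s

def remove_duplicated_lane_seqs_alt (exists_lane_seqs : List (List Int)) : List Int :=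
  let n : Int := exists_lane_seqs.length
  (PySem.List.pyRange 0 n 1).foldl (fun res i =>
    let s := PySem.List.pyGetD exists_lane_seqs i []
    if !((PySem.List.pyRange 0 n 1).any (fun j =>
        pvBeats (PySem.List.pyGetD exists_lane_seqs j []) s j i)) then res ++ [i]
    else res) []

-- ===== PRECONDITION & SPEC =====
def Spec_remove_duplicated_lane_seqs (exists_lane_seqs : List (List Int)) (out : List Int) : Prop := out = remove_duplicated_lane_seqs_alt exists_lane_seqs
instance (exists_lane_seqs : List (List Int)) (out : List Int) : Decidable (Spec_remove_duplicated_lane_seqs exists_lane_seqs out) := by unfold Spec_remove_duplicated_lane_seqs; infer_instance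

-- ===== CLAIM (what is proved, stated in full; the proofs are below) =====
def Claim_equal_remove_duplicated_lane_seqs : Prop := ∀ (exists_lane_seqs : List (List Int)), Dom_remove_duplicated_lane_seqs exists_lane_seqs → Spec_remove_duplicated_lane_seqs exists_lane_seqs (remove_duplicated_lane_seqs exists_lane_seqs)

-- ===== LEMMAS AND PROOFS =====

-- `s` occurs as a contiguous block of `t`, characterised by a drop/take window.
theorem pv_infix_iff (s t : List Int) :
    s <:+: t ↔ ∃ k : Nat, k + s.length ≤ t.length ∧ (t.drop k).take s.length = s := by
  constructor
  · rintro ⟨u, v, rfl⟩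
    exact ⟨u.length, by simp, by simp⟩
  · rintro ⟨k, hk, hs⟩
    exact hs ▸ (((t.drop k).take_prefix _).isInfix.trans (t.drop_suffix k).isInfix)

-- B's slice-based scan decides infixity.
theorem pvContains_iff (t s : List Int) : pvContains t s = true ↔ s <:+: t := by
  rw [pv_infix_iff]
  unfold pvContains
  split
  · rename_i hle
    rw [List.any_eq_true]
    constructor
    · rintro ⟨k, hk, hslice⟩
      rw [PySem.List.mem_pyRange_one] at hk
      obtain ⟨hk0, hk1⟩ := hk
      refine ⟨k.toNat, by omega, ?_⟩
      rw [PySem.List.slice_toNat _ hk0 (by omega)] at hslice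
      have : (k + (s.length : Int)).toNat - k.toNat = s.length := by omega
      rw [this] at hslice
      exact eq_of_beq hslice
    · rintro ⟨k, hk, hs⟩
      refine ⟨(k : Int), ?_, ?_⟩
      · rw [PySem.List.mem_pyRange_one]; omega
      · rw [PySem.List.slice_toNat _ (by omega) (by omega)]
        have : ((k : Int) + (s.length : Int)).toNat - (k : Int).toNat = s.length := by omega
        rw [this]
        simp [hs]
  · rename_i hle
    constructor
    · intro h; exact absurd h (by simp)
    · rintro ⟨k, hk, -⟩
      exact absurd hk (by omega)

-- one window of A's inner element-by-element scan
theorem pv_window_iff (t s : List Int) (k : Int) (hk0 : 0 ≤ k)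
    (hk : k.toNat + s.length ≤ t.length) :
    ((PySem.List.pyRange 0 (s.length : Int) 1).all (fun j =>
        PySem.List.pyGetD t (k + j) 0 == PySem.List.pyGetD s j 0)) = true
      ↔ (t.drop k.toNat).take s.length = s := by
  rw [List.all_eq_true]
  constructor
  · intro hall
    apply List.ext_getElem
    · simp; omega
    · intro i h1 h2
      have hi : i < s.length := h2
      have h := hall (i : Int) (by rw [PySem.List.mem_pyRange_one]; omega)
      simp only [beq_iff_eq] at h
      rw [PySem.List.pyGetD_eq_getElem _ _ (by omega) (by omega),
          PySem.List.pyGetD_eq_getElem _ _ (by omega) (by omega)] at h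
      have e1 : (k + (i : Int)).toNat = k.toNat + i := by omega
      have e2 : ((i : Int)).toNat = i := by omega
      simp only [e1, e2] at h
      simpa [List.getElem_take, List.getElem_drop] using h
  · intro heq j hj
    rw [PySem.List.mem_pyRange_one] at hj
    simp only [beq_iff_eq]
    rw [PySem.List.pyGetD_eq_getElem _ _ (by omega) (by omega),
        PySem.List.pyGetD_eq_getElem _ _ (by omega) (by omega)]
    have e1 : (k + j).toNat = k.toNat + j.toNat := by omega
    simp only [e1]
    have hjn : j.toNat < s.length := by omega
    have h4 : ((t.drop k.toNat).take s.length)[j.toNat]'(by simp; omega) = s[j.toNat]'hjn := by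
      simp [heq]
    simpa [List.getElem_take, List.getElem_drop] using h4

-- A's element-by-element scan decides infixity too.
theorem pvBelong_iff (t s : List Int) : pvBelong t s = true ↔ s <:+: t := by
  rw [pv_infix_iff]
  unfold pvBelong
  split
  · rename_i hlt
    constructor
    · intro h; exact absurd h (by simp)
    · rintro ⟨k, hk, -⟩; exact absurd hk (by omega)
  · rename_i hlt
    rw [List.any_eq_true]
    constructor
    · rintro ⟨k, hk, hall⟩
      rw [PySem.List.mem_pyRange_one] at hk
      refine ⟨k.toNat, by omega, ?_⟩
      exact (pv_window_iff t s k (by omega) (by omega)).mp hall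
    · rintro ⟨k, hk, hwin⟩
      refine ⟨(k : Int), by rw [PySem.List.mem_pyRange_one]; omega, ?_⟩
      apply (pv_window_iff t s (k : Int) (by omega) (by simpa using hk)).mpr
      simpa using hwin

theorem pvBelong_eq (t s : List Int) : pvBelong t s = pvContains t s := by
  cases hb : pvBelong t s <;> cases hc : pvContains t s
  · rfl
  · exact absurd ((pvContains_iff t s).mp hc) (fun h => by simp [(pvBelong_iff t s).mpr h] at hb)
  · exact absurd ((pvBelong_iff t s).mp hb) (fun h => by simp [(pvContains_iff t s).mpr h] at hc)
  · rfl

theorem pvContains_trans {a b c : List Int} (h1 : pvContains b a = true)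
    (h2 : pvContains c b = true) : pvContains c a = true := by
  rw [pvContains_iff] at *
  exact h1.trans h2

-- enumerate as an indexed map (specialised to List Int elements)
theorem pv_enum_eq (xs : List (List Int)) (st : Int) :
    PySem.List.enumerate xs st
      = (List.range xs.length).map (fun (m : Nat) => (st + (m : Int), xs.getD m [])) := by
  induction xs generalizing st with
  | nil => simp [PySem.List.enumerate_nil]
  | cons x xs ih =>
    rw [PySem.List.enumerate_cons, ih]
    simp [List.range_succ_eq_map, List.map_map, Function.comp_def]
    intro a _
    omega

theorem pv_enum_zero (xs : List (List Int)) :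
    PySem.List.enumerate xs 0
      = (List.range xs.length).map (fun (m : Nat) => ((m : Int), xs.getD m [])) := by
  rw [pv_enum_eq]
  simp

-- B's per-index keep decision, as used by the proofs
def pvKeptB (seqs : List (List Int)) (i : Int) : Bool :=
  !((PySem.List.pyRange 0 (seqs.length : Int) 1).any (fun j =>
      pvBeats (PySem.List.pyGetD seqs j []) (PySem.List.pyGetD seqs i []) j i))

-- the strict processing order of A's sort, on indices
def pvOrd (seqs : List (List Int)) (j i : Int) : Prop :=
  ((PySem.List.pyGetD seqs j []).length : Int) > ((PySem.List.pyGetD seqs i []).length : Int) ∨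
    (((PySem.List.pyGetD seqs j []).length : Int) = ((PySem.List.pyGetD seqs i []).length : Int)
      ∧ j < i)

theorem pvBeats_iff (seqs : List (List Int)) (j i : Int) :
    pvBeats (PySem.List.pyGetD seqs j []) (PySem.List.pyGetD seqs i []) j i = true
      ↔ pvOrd seqs j i ∧
        pvContains (PySem.List.pyGetD seqs j []) (PySem.List.pyGetD seqs i []) = true := by
  unfold pvBeats pvOrd
  simp [Bool.and_eq_true, Bool.or_eq_true]

theorem pvKeptB_false_iff (seqs : List (List Int)) (i : Int) :
    pvKeptB seqs i = false
      ↔ ∃ j : Int, 0 ≤ j ∧ j < (seqs.length : Int) ∧ pvOrd seqs j i ∧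
          pvContains (PySem.List.pyGetD seqs j []) (PySem.List.pyGetD seqs i []) = true := by
  unfold pvKeptB
  rw [Bool.not_eq_false', List.any_eq_true]
  constructor
  · rintro ⟨j, hj, hd⟩
    rw [PySem.List.mem_pyRange_one] at hj
    obtain ⟨h1, h2⟩ := (pvBeats_iff seqs j i).mp hd
    exact ⟨j, hj.1, hj.2, h1, h2⟩
  · rintro ⟨j, h0, h1, h2, h3⟩
    exact ⟨j, by rw [PySem.List.mem_pyRange_one]; omega, (pvBeats_iff seqs j i).mpr ⟨h2, h3⟩⟩

def pvEncKey (n : Int) (p : Int × List Int) : Int := -(p.2.length : Int) * n + p.1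

theorem pv_enc_lt_iff {A B i j n : Int} (hi : 0 ≤ i) (hi' : i < n) (hj : 0 ≤ j) (hj' : j < n) :
    A * n + i < B * n + j ↔ (A < B ∨ (A = B ∧ i < j)) := by
  constructor
  · intro h
    rcases lt_trichotomy A B with h1 | h1 | h1
    · exact Or.inl h1
    · exact Or.inr ⟨h1, by subst h1; omega⟩
    · exfalso
      have hn : (0 : Int) ≤ n := le_of_lt (lt_of_le_of_lt hi hi')
      have : (B + 1) * n ≤ A * n := mul_le_mul_of_nonneg_right (by omega) hn
      nlinarith
  · rintro (h1 | ⟨h1, h2⟩)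
    · have hn : (0 : Int) ≤ n := le_of_lt (lt_of_le_of_lt hi hi')
      have : (A + 1) * n ≤ B * n := mul_le_mul_of_nonneg_right (by omega) hn
      nlinarith
    · subst h1; omega

theorem pv_bool_lex (x y i j : Int) :
    (decide (x < y) || (!decide (y < x) && decide (i < j)))
      = decide (x < y ∨ (x = y ∧ i < j)) := by
  rcases lt_trichotomy x y with h | h | h
  · simp [h]
  · subst h; simp
  · simp [not_lt_of_gt h, ne_of_gt h]
    omega

theorem pv_insertBy_congr {α : Type} (f g : α → α → Bool) (x : α) (ys : List α)
    (h : ∀ y ∈ ys, f x y = g x y) :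
    PySem.List.insertBy f x ys = PySem.List.insertBy g x ys := by
  induction ys with
  | nil => rfl
  | cons y ys ih =>
    simp only [PySem.List.insertBy]
    rw [h y (by simp)]
    split
    · rfl
    · rw [show PySem.List.insertBy f x ys = PySem.List.insertBy g x ys from
        ih (fun z hz => h z (by simp [hz]))]

theorem pv_foldl_insertBy_congr {α : Type} (f g : α → α → Bool) :
    ∀ (xs acc : List α), (∀ a ∈ xs, ∀ y ∈ acc, f a y = g a y) →
      (∀ a ∈ xs, ∀ b ∈ xs, f a b = g a b) →
      xs.foldl (fun acc x => PySem.List.insertBy f x acc) acc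
        = xs.foldl (fun acc x => PySem.List.insertBy g x acc) acc := by
  intro xs
  induction xs with
  | nil => intro acc _ _; rfl
  | cons x xs ih =>
    intro acc h1 h2
    simp only [List.foldl_cons]
    rw [pv_insertBy_congr f g x acc (h1 x (by simp))]
    apply ih
    · intro a ha y hy
      rw [PySem.List.mem_insertBy] at hy
      rcases hy with rfl | hy
      · exact h2 a (by simp [ha]) y (by simp)
      · exact h1 a (by simp [ha]) y hy
    · intro a ha b hb
      exact h2 a (by simp [ha]) b (by simp [hb])

-- the sorted2 call of port A is the single-key sort by pvEncKey
theorem pv_sorted2_eq (seqs : List (List Int)) :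
    PySem.List.sorted2 (PySem.List.enumerate seqs 0)
        (fun p => -(p.2.length : Int)) (fun p => p.1) false
      = PySem.List.sorted (PySem.List.enumerate seqs 0) (pvEncKey (seqs.length : Int)) false := by
  simp only [PySem.List.sorted2, PySem.List.sorted, if_neg (by decide : ¬(false = true))]
  apply pv_foldl_insertBy_congr
  · intro a _ y hy
    exact absurd hy (by simp)
  · intro a ha b hb
    rw [pv_enum_zero] at ha hb
    simp only [List.mem_map, List.mem_range] at ha hb
    obtain ⟨ma, hma, rfl⟩ := ha
    obtain ⟨mb, hmb, rfl⟩ := hb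
    simp only [pvEncKey]
    rw [pv_bool_lex]
    have h := pv_enc_lt_iff (A := -((seqs.getD ma []).length : Int))
      (B := -((seqs.getD mb []).length : Int)) (i := (ma : Int)) (j := (mb : Int))
      (n := (seqs.length : Int)) (by omega) (by omega) (by omega) (by omega)
    simp only [decide_eq_decide]
    exact h.symm

-- A's filtering loop, against a kept-list, computes (as a set) exactly B's per-index decision:
-- substring-domination is transitive, so checking against kept representatives only suffices.
theorem pv_fold_spec (seqs : List (List Int)) :
    ∀ (L' P : List (Int × List Int)) (acc : List Int),
      (∀ p ∈ P ++ L', 0 ≤ p.1 ∧ p.1 < (seqs.length : Int) ∧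
          PySem.List.pyGetD seqs p.1 [] = p.2) →
      (P ++ L').Pairwise (fun p q => pvOrd seqs p.1 q.1) →
      (∀ i : Int, 0 ≤ i → i < (seqs.length : Int) →
          (i, PySem.List.pyGetD seqs i []) ∈ P ++ L') →
      acc.Perm ((P.map (·.1)).filter (pvKeptB seqs)) →
      (∀ p ∈ P, pvKeptB seqs p.1 = false →
          ∃ j ∈ acc, pvContains (PySem.List.pyGetD seqs j []) p.2 = true) →
      (L'.foldl (fun acc p =>
          if acc.all (fun j => !pvBelong (PySem.List.pyGetD seqs j []) p.2) then acc ++ [p.1]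
          else acc) acc).Perm (((P ++ L').map (·.1)).filter (pvKeptB seqs)) := by
  intro L'
  induction L' with
  | nil =>
    intro P acc _ _ _ hacc _
    simpa using hacc
  | cons p L'' ih =>
    intro P acc hmem hpw hcover hacc hdrop
    have hre : P ++ p :: L'' = (P ++ [p]) ++ L'' := by simp
    have hp := hmem p (by simp)
    obtain ⟨hp0, hp1, hpseq⟩ := hp
    have hPbefore : ∀ q ∈ P, pvOrd seqs q.1 p.1 := by
      intro q hq
      exact ((List.pairwise_append.mp hpw).2.2 q hq p (by simp))
    -- membership of acc elements: they are kept indices of P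
    have haccmem : ∀ j ∈ acc, (∃ q ∈ P, q.1 = j) ∧ pvKeptB seqs j = true := by
      intro j hj
      have := hacc.mem_iff.mp hj
      rw [List.mem_filter] at this
      obtain ⟨hj1, hj2⟩ := this
      rw [List.mem_map] at hj1
      obtain ⟨q, hq, hq1⟩ := hj1
      exact ⟨⟨q, hq, hq1⟩, hj2⟩
    simp only [List.foldl_cons]
    by_cases hk : pvKeptB seqs p.1 = true
    · -- A keeps p: no kept predecessor contains it
      have hcheck : (acc.all (fun j => !pvBelong (PySem.List.pyGetD seqs j []) p.2)) = true := by
        rw [List.all_eq_true]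
        intro j hj
        obtain ⟨⟨q, hq, hq1⟩, hkj⟩ := haccmem j hj
        rw [Bool.not_eq_eq_eq_not, Bool.not_true]  -- goal: pvBelong … = false
        by_contra hb
        rw [Bool.not_eq_false, pvBelong_eq] at hb
        obtain ⟨hqa, hqb, hqc⟩ := hmem q (by simp [hq])
        have : pvKeptB seqs p.1 = false := by
          rw [pvKeptB_false_iff]
          refine ⟨j, by omega, by omega, ?_, ?_⟩
          · rw [← hq1]; exact hPbefore q hq
          · rw [hpseq]; exact hb
        simp [this] at hk
      rw [hcheck]
      simp only [if_pos]
      rw [hre] at hmem hpw hcover ⊢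
      apply ih (P ++ [p]) (acc ++ [p.1]) hmem hpw hcover
      · have : ((P ++ [p]).map (·.1)).filter (pvKeptB seqs)
            = (P.map (·.1)).filter (pvKeptB seqs) ++ [p.1] := by
          simp [List.filter_append, hk]
        rw [this]
        exact hacc.append (List.Perm.refl _)
      · intro q hq hqf
        rcases List.mem_append.mp hq with hq | hq
        · obtain ⟨j, hj, hjc⟩ := hdrop q hq hqf
          exact ⟨j, by simp [hj], hjc⟩
        · simp at hq
          subst hq
          simp [hk] at hqf
    · -- A drops p: some member of acc contains it
      rw [Bool.not_eq_true] at hk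
      obtain ⟨j0, hj00, hj01, hj0ord, hj0c⟩ := (pvKeptB_false_iff seqs p.1).mp hk
      -- the dominator's pair is somewhere in the list; it cannot be p or after p
      have hq0mem : (j0, PySem.List.pyGetD seqs j0 []) ∈ P ++ p :: L'' := hcover j0 hj00 hj01
      have hq0P : (j0, PySem.List.pyGetD seqs j0 []) ∈ P := by
        rcases List.mem_append.mp hq0mem with h | h
        · exact h
        · rcases List.mem_cons.mp h with h | h
          · exfalso
            have : j0 = p.1 := congrArg Prod.fst h
            subst this
            unfold pvOrd at hj0ord
            omega
          · exfalso
            have := (List.pairwise_append.mp hpw).2.1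
            have hop : pvOrd seqs p.1 j0 := by
              have := (List.pairwise_cons.mp this).1 _ h
              simpa using this
            unfold pvOrd at hj0ord hop
            omega
      -- produce a kept witness in acc that contains p's sequence
      have hwit : ∃ jw ∈ acc, pvContains (PySem.List.pyGetD seqs jw []) p.2 = true := by
        by_cases hkj0 : pvKeptB seqs j0 = true
        · refine ⟨j0, ?_, ?_⟩
          · apply hacc.mem_iff.mpr
            rw [List.mem_filter]
            refine ⟨List.mem_map.mpr ⟨_, hq0P, rfl⟩, hkj0⟩
          · rw [hpseq] at hj0c
            exact hj0c
        · rw [Bool.not_eq_true] at hkj0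
          obtain ⟨jw, hjw, hjwc⟩ := hdrop _ hq0P (by simpa using hkj0)
          refine ⟨jw, hjw, ?_⟩
          rw [hpseq] at hj0c
          exact pvContains_trans hj0c hjwc
      obtain ⟨jw, hjw, hjwc⟩ := hwit
      have hcheck : (acc.all (fun j => !pvBelong (PySem.List.pyGetD seqs j []) p.2)) = false := by
        rw [List.all_eq_false]
        exact ⟨jw, hjw, by simp [pvBelong_eq, hjwc]⟩
      rw [hcheck]
      simp only [Bool.false_eq_true, if_false]
      rw [hre] at hmem hpw hcover ⊢
      apply ih (P ++ [p]) acc hmem hpw hcover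
      · have : ((P ++ [p]).map (·.1)).filter (pvKeptB seqs)
            = (P.map (·.1)).filter (pvKeptB seqs) := by
          simp [List.filter_append, hk]
        rw [this]
        exact hacc
      · intro q hq hqf
        rcases List.mem_append.mp hq with hq | hq
        · exact hdrop q hq hqf
        · simp at hq
          subst hq
          exact ⟨jw, hjw, hjwc⟩

-- B's fold is the ascending filter by pvKeptB
theorem pv_alt_eq_filter (seqs : List (List Int)) :
    remove_duplicated_lane_seqs_alt seqs
      = (PySem.List.pyRange 0 (seqs.length : Int) 1).filter (fun i => pvKeptB seqs i) := by
  show (PySem.List.pyRange 0 (seqs.length : Int) 1).foldl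
      (fun res i => if pvKeptB seqs i then res ++ [i] else res) [] = _
  rw [PySem.List.foldl_append_if (f := fun i => i)]
  simp

-- ===== VERDICT (by name: the statement is the Claim_ definition above) =====
theorem remove_duplicated_lane_seqs_spec : Claim_equal_remove_duplicated_lane_seqs := by
  intro seqs _
  unfold Spec_remove_duplicated_lane_seqs
  simp only [remove_duplicated_lane_seqs]
  rw [pv_sorted2_eq]
  set L := PySem.List.sorted (PySem.List.enumerate seqs 0)
    (pvEncKey (seqs.length : Int)) false with hLdef
  have hperm : L.Perm (PySem.List.enumerate seqs 0) := PySem.List.sorted_perm _ _ _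
  have hmem : ∀ p ∈ L, 0 ≤ p.1 ∧ p.1 < (seqs.length : Int) ∧
      PySem.List.pyGetD seqs p.1 [] = p.2 := by
    intro p hp
    have hin := hperm.mem_iff.mp hp
    rw [pv_enum_zero] at hin
    simp only [List.mem_map, List.mem_range] at hin
    obtain ⟨m, hm, rfl⟩ := hin
    refine ⟨by simp, by simpa using hm, by simp⟩
  have hcover : ∀ i : Int, 0 ≤ i → i < (seqs.length : Int) →
      (i, PySem.List.pyGetD seqs i []) ∈ L := by
    intro i h0 h1
    apply hperm.mem_iff.mpr
    rw [pv_enum_zero]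
    refine List.mem_map.mpr ⟨i.toNat, by simp [List.mem_range]; omega, ?_⟩
    have hi : ((i.toNat : Int)) = i := by omega
    have h2 : PySem.List.pyGetD seqs i [] = seqs.getD i.toNat [] := by
      rw [← hi, PySem.List.pyGetD_natCast, Int.toNat_natCast]
    rw [hi, h2]
  have hpwle : L.Pairwise (fun a b =>
      pvEncKey (seqs.length : Int) a ≤ pvEncKey (seqs.length : Int) b) :=
    PySem.List.sorted_pairwise _ _
  have hfstnd : (L.map (·.1)).Nodup := by
    have h1 : (L.map (·.1)).Perm ((PySem.List.enumerate seqs 0).map (·.1)) := hperm.map _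
    rw [PySem.List.map_fst_enumerate] at h1
    exact h1.nodup_iff.mpr (by simpa using PySem.List.nodup_pyRange_one 0 (seqs.length : Int))
  have hnodup : L.Pairwise (fun a b => a.1 ≠ b.1) := List.pairwise_map.mp hfstnd
  have hpw : L.Pairwise (fun p q => pvOrd seqs p.1 q.1) := by
    refine List.Pairwise.imp_of_mem ?_ (hpwle.and hnodup)
    rintro a b ha hb ⟨hle, hne⟩
    obtain ⟨ha0, ha1, ha2⟩ := hmem a ha
    obtain ⟨hb0, hb1, hb2⟩ := hmem b hb
    have hiff := pv_enc_lt_iff (A := -((b.2.length : Int))) (B := -((a.2.length : Int)))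
      (i := b.1) (j := a.1) (n := (seqs.length : Int)) hb0 hb1 ha0 ha1
    have hnot : ¬ (pvEncKey (seqs.length : Int) b < pvEncKey (seqs.length : Int) a) :=
      not_lt.mpr hle
    unfold pvEncKey at hnot
    rw [hiff] at hnot
    unfold pvOrd
    rw [ha2, hb2]
    push Not at hnot
    omega
  have hfold := pv_fold_spec seqs L [] [] (by simpa using hmem) (by simpa using hpw)
    (by simpa using hcover) (by simp) (by simp)
  simp only [List.nil_append] at hfold
  rw [pv_alt_eq_filter]
  apply PySem.List.sorted_id_eq_of_perm_of_pairwise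
  · -- the ascending filtered range is a permutation of A's filter_index
    have h1 : ((PySem.List.pyRange 0 (seqs.length : Int) 1).filter
        (fun i => pvKeptB seqs i)).Perm ((L.map (·.1)).filter (pvKeptB seqs)) := by
      apply List.Perm.filter
      have h2 := (hperm.map (·.1)).symm
      rw [PySem.List.map_fst_enumerate] at h2
      simpa using h2
    exact h1.trans hfold.symm
  · exact ((PySem.List.pairwise_lt_pyRange_one 0 (seqs.length : Int)).filter _).imp
      (fun h => le_of_lt h)
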